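-- pv_equiv track=rewrite | github.com/danirod-live/aoc19 | 18/problem_b.py | compute_map
-- ===== SOURCE A (Python) =====
-- def position(map2d, key):
--     charmap = map2d.split("\n")
--     row = [i for i in range(len(charmap)) if key in charmap[i]][0]
--     return (charmap[row].index(key), row)
--
-- def compute_map(map2d):
--     DELTA = [(1, 0), (-1, 0), (0, 1), (0, -1)]
--     def keys_i_can_visit(map2d, key):
--         charmap = map2d.split("\n")
--
--         def find_keys(x, y, visited=None):
--             # Keep a list of visited nodes to avoid infinite loops.
--             if not visited:
--                 visited = {(x, y)}
--
--             keys = []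
--             for dx, dy in DELTA:
--                 cx, cy = x + dx, y + dy
--
--                 # Don't look twice
--                 if (cx, cy) in visited:
--                     continue
--
--                 cell = charmap[cy][cx]
--
--                 if 'a' <= cell <= 'z':
--                     keys.append((cell, 1, []))
--                 if 'A' <= cell <= 'Z':
--                     # Assume you can get in as long as you have the key
--                     visited.add((cx, cy))
--                     keys += [
--                         (key, dist + 1, doors + [cell.lower()])
--                         for key, dist, doors in find_keys(cx, cy, visited)
--                     ]
--                     visited.remove((cx, cy))
--                 if cell == '.' or cell == '@':
--                     # It's air.
--                     visited.add((cx, cy))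
--                     keys += [
--                         (key, dist + 1, doors)
--                         for key, dist, doors in find_keys(cx, cy, visited)
--                     ]
--                     visited.remove((cx, cy))
--             return keys
--         ox, oy = position(map2d, key)
--         return find_keys(ox, oy)
--     keys = [k for k in map2d if 'a' <= k <= 'z' or k == '@']
--     return {key: keys_i_can_visit(map2d, key) for key in keys}
-- ===== SOURCE B (Python) =====
-- def compute_map(map2d):
--     # Iterative DFS with an explicit stack of frames instead of A's recursion;
--     # equivalence is about the return value only (neither mutates its argument).
--     DELTA = [(1, 0), (-1, 0), (0, 1), (0, -1)]
--     charmap = map2d.split("\n")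
--
--     def start_pos(key):
--         for y in range(len(charmap)):
--             x = charmap[y].find(key)
--             if x != -1:
--                 return (x, y)
--
--     def visit(key):
--         ox, oy = start_pos(key)
--         result = []
--         stack = [("expand", ox, oy, 0, [], frozenset([(ox, oy)]))]
--         while stack:
--             frame = stack.pop()
--             if frame[0] == "emit":
--                 result.append(frame[1])
--                 continue
--             _, x, y, dist, doors, visited = frame
--             items = []
--             for dx, dy in DELTA:
--                 cx, cy = x + dx, y + dy
--                 if (cx, cy) in visited:
--                     continue
--                 cell = charmap[cy][cx]
--                 if 'a' <= cell <= 'z':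
--                     items.append(("emit", (cell, dist + 1, doors)))
--                 elif 'A' <= cell <= 'Z':
--                     items.append(("expand", cx, cy, dist + 1,
--                                   [cell.lower()] + doors, visited | {(cx, cy)}))
--                 elif cell == '.' or cell == '@':
--                     items.append(("expand", cx, cy, dist + 1,
--                                   doors, visited | {(cx, cy)}))
--             stack.extend(reversed(items))
--         return result
--
--     out = {}
--     for k in map2d:
--         if ('a' <= k <= 'z' or k == '@') and k not in out:
--             out[k] = visit(k)
--     return out
-- ===== Notes on version B (the rewrite author's own statement) =====
-- stated objective: alternative
-- what changed: Replaces A's recursive backtracking DFS (shared visited set mutated with add/remove, distances and doors accumulated on the way back up the call stack) by an explicit stack machine of emit/expand frames that carries per-frame distance, door list and an immutable visited set, emitting keys in the same preorder; duplicate key characters are computed once via a seen-check instead of A's recompute-and-overwrite dict comprehension.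
-- outside the precondition, e.g. on compute_map('####\n#a#\n###'): A returns {'a': []}, B returns {'a': []}; on compute_map('a###\n####'): A returns {'a': []}, B returns {'a': []}
import Mathlib
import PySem

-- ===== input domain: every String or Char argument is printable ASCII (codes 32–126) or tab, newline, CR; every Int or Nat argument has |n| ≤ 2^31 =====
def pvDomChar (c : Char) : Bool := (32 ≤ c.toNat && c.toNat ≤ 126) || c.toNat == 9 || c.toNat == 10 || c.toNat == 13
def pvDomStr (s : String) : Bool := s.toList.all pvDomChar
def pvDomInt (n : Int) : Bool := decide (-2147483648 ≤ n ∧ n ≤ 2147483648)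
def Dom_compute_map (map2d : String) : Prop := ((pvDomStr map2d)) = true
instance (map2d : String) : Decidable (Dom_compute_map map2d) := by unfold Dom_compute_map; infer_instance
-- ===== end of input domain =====

-- B replaces A's recursive backtracking DFS by an explicit stack machine of emit/expand
-- frames (objective: alternative decomposition, same enumeration and cost).

-- ===== PORT A =====
-- DELTA (same constant in both Pythons)
def pvDelta : List (Int × Int) := [(1, 0), (-1, 0), (0, 1), (0, -1)]

-- charmap[cy][cx] (none = IndexError, excluded by Pre_)
def pvCell (charmap : List String) (cx cy : Int) : Option Char :=
  match PySem.List.pyGet? charmap cy with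
  | none => none
  | some row => PySem.Str.pyGet? row cx

-- A's find_keys; the fuel argument is only a totality guard (Python has none); the top
-- call's `if not visited: visited = {(x, y)}` is inlined at the call site below.
def pvFindKeysA (charmap : List String) :
    Nat → Int → Int → PySem.Set (Int × Int) → List (String × Int × List String)
  | 0, _, _, _ => []
  | fuel + 1, x, y, visited =>
    pvDelta.foldl (fun keys δ =>
      let cx := x + δ.1
      let cy := y + δ.2
      if (cx, cy) ∈ visited then keys
      else
        match pvCell charmap cx cy with
        | none => keys   -- Python raises IndexError here (outside Pre_)
        | some cell =>
          let keys1 := if 'a' ≤ cell ∧ cell ≤ 'z' then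
              keys ++ [(String.ofList [cell], (1 : Int), ([] : List String))] else keys
          let keys2 := if 'A' ≤ cell ∧ cell ≤ 'Z' then
              keys1 ++ (pvFindKeysA charmap fuel cx cy (PySem.Set.add visited (cx, cy))).map
                (fun r => (r.1, r.2.1 + 1, r.2.2 ++ [PySem.Str.lower (String.ofList [cell])]))
            else keys1
          if cell = '.' ∨ cell = '@' then
              keys2 ++ (pvFindKeysA charmap fuel cx cy (PySem.Set.add visited (cx, cy))).map
                (fun r => (r.1, r.2.1 + 1, r.2.2))
            else keys2) []

-- position: `[i for i in range(len(charmap)) if key in charmap[i]][0]`; `[][0]` would be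
-- IndexError (unreachable here: the key is taken from the map); str.index = Str.find when present.
def pvPositionA (map2d key : String) : Int × Int :=
  let charmap := (PySem.Str.split? map2d "\n").getD []   -- sep "\n" ≠ "", so split? is some
  match (PySem.List.pyRange 0 (PySem.List.len charmap) 1).filter
      (fun i => PySem.Str.isIn key (PySem.List.pyGetD charmap i "")) with
  | [] => (0, 0)
  | row :: _ => (PySem.Str.find (PySem.List.pyGetD charmap row "") key, row)

def pvKeysICanVisitA (map2d key : String) : List (String × Int × List String) :=
  let charmap := (PySem.Str.split? map2d "\n").getD []
  let p := pvPositionA map2d key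
  pvFindKeysA charmap (map2d.toList.length + 1) p.1 p.2
    (PySem.Set.add PySem.Set.empty (p.1, p.2))

def compute_map (map2d : String) : List (String × List (String × Int × List String)) :=
  let keys := map2d.toList.filter (fun k => decide (('a' ≤ k ∧ k ≤ 'z') ∨ k = '@'))
  (keys.foldl (fun (d : PySem.Dict String (List (String × Int × List String))) k =>
      d.insert (String.ofList [k]) (pvKeysICanVisitA map2d (String.ofList [k])))
    PySem.Dict.empty).items

-- ===== PORT B =====
inductive PvItem : Type where
  | emit   : String × Int × List String → PvItem
  | expand : Int → Int → Int → List String → PySem.Set (Int × Int) → Nat → PvItem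

def pvWeight : PvItem → Nat
  | .emit _ => 1
  | .expand _ _ _ _ _ f => 5 ^ f

-- one neighbour of a popped frame (the body of B's `for dx, dy in DELTA` loop);
-- the Nat argument is the child frames' totality fuel
def pvNbrItem (charmap : List String) (x y dist : Int) (doors : List String)
    (visited : PySem.Set (Int × Int)) (d : Nat) (δ : Int × Int) : Option PvItem :=
  let cx := x + δ.1
  let cy := y + δ.2
  if (cx, cy) ∈ visited then none
  else
    match pvCell charmap cx cy with
    | none => none   -- Python raises IndexError here (outside Pre_)
    | some cell =>
      if 'a' ≤ cell ∧ cell ≤ 'z' then some (.emit (String.ofList [cell], dist + 1, doors))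
      else if 'A' ≤ cell ∧ cell ≤ 'Z' then
        some (.expand cx cy (dist + 1) (PySem.Str.lower (String.ofList [cell]) :: doors)
          (PySem.Set.add visited (cx, cy)) d)
      else if cell = '.' ∨ cell = '@' then
        some (.expand cx cy (dist + 1) doors (PySem.Set.add visited (cx, cy)) d)
      else none

-- the two lemmas below are cited by pvRun's decreasing_by (termination only)
theorem pvWeight_nbrItem {charmap : List String} {x y dist : Int} {doors : List String}
    {visited : PySem.Set (Int × Int)} {d : Nat} {δ : Int × Int} {it : PvItem}
    (h : pvNbrItem charmap x y dist doors visited d δ = some it) : pvWeight it ≤ 5 ^ d := by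
  unfold pvNbrItem at h
  dsimp only at h
  split at h
  · exact absurd h (by simp)
  · split at h
    · exact absurd h (by simp)
    · split_ifs at h <;> cases h <;> simp [pvWeight, Nat.one_le_iff_ne_zero]

theorem pvWeight_filterMap_le (l : List (Int × Int)) (f : Int × Int → Option PvItem) (B : Nat)
    (h : ∀ a it, f a = some it → pvWeight it ≤ B) :
    ((l.filterMap f).map pvWeight).sum ≤ l.length * B := by
  induction l with
  | nil => simp
  | cons a l ih =>
    cases hf : f a with
    | none => simp only [List.filterMap_cons, hf, List.length_cons]
              calc ((l.filterMap f).map pvWeight).sum ≤ l.length * B := ih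
                _ ≤ (l.length + 1) * B := by nlinarith
    | some it =>
      simp only [List.filterMap_cons, hf, List.map_cons, List.sum_cons, List.length_cons]
      have h1 := h a it hf
      have := ih
      nlinarith

-- the while loop over the explicit stack (head = top of stack; Python's
-- `stack.extend(reversed(items))` followed by pops from the end is `items ++ rest` here);
-- an expand frame with exhausted fuel is the totality guard (Python has none)
def pvRun (charmap : List String) : List PvItem → List (String × Int × List String)
  | [] => []
  | .emit r :: rest => r :: pvRun charmap rest
  | .expand _ _ _ _ _ 0 :: rest => pvRun charmap rest
  | .expand x y dist doors visited (d + 1) :: rest =>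
      pvRun charmap (pvDelta.filterMap (pvNbrItem charmap x y dist doors visited d) ++ rest)
termination_by stack => (stack.map pvWeight).sum
decreasing_by
  · simp only [List.map_cons, List.sum_cons, pvWeight]; omega
  · simp only [List.map_cons, List.sum_cons, pvWeight]; omega
  · simp only [List.map_cons, List.sum_cons, List.map_append, List.sum_append, pvWeight]
    have hb := pvWeight_filterMap_le pvDelta
      (pvNbrItem charmap x y dist doors visited d) (5 ^ d)
      (fun a it h => pvWeight_nbrItem h)
    have hlen : pvDelta.length = 4 := rfl
    rw [hlen] at hb
    have hpos : 0 < 5 ^ d := pow_pos (by omega) d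
    omega

-- B's start_pos: scan `for y in range(len(charmap))` (returning None is unreachable
-- for keys taken from the map; ported as (0, 0))
def pvStartLoopB (charmap : List String) (key : String) : List Int → Int × Int
  | [] => (0, 0)
  | y :: ys =>
    let x := PySem.Str.find (PySem.List.pyGetD charmap y "") key
    if x ≠ -1 then (x, y) else pvStartLoopB charmap key ys

def pvVisitB (charmap : List String) (fuel : Nat) (key : String) :
    List (String × Int × List String) :=
  let p := pvStartLoopB charmap key (PySem.List.pyRange 0 (PySem.List.len charmap) 1)
  pvRun charmap [PvItem.expand p.1 p.2 0 [] (PySem.Set.add PySem.Set.empty (p.1, p.2)) fuel]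

def compute_map_alt (map2d : String) : List (String × List (String × Int × List String)) :=
  let charmap := (PySem.Str.split? map2d "\n").getD []
  (map2d.toList.foldl (fun (out : PySem.Dict String (List (String × Int × List String))) k =>
      if (('a' ≤ k ∧ k ≤ 'z') ∨ k = '@') ∧ ¬(out.contains (String.ofList [k]) = true) then
        out.insert (String.ofList [k]) (pvVisitB charmap (map2d.toList.length + 1) (String.ofList [k]))
      else out)
    PySem.Dict.empty).items

-- ===== PRECONDITION & SPEC =====
-- Pre_ excludes maps that are non-rectangular or that have a key/door/air cell on the
-- border: there A's neighbour reads can raise IndexError or silently wrap around via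
-- Python's negative indexing. Bool-valued closed form: either the map has no lowercase
-- key and no '@' (A builds no path at all, so it is always safe), or it is rectangular
-- with every key/door/air cell off the border.
def pvPreCheck (map2d : String) : Bool :=
  let lines := (PySem.Chars.split? map2d.toList ['\n']).getD []
  let w := (lines.headD []).length
  let h := lines.length
  (map2d.toList.all fun c => !((decide ('a' ≤ c) && decide (c ≤ 'z')) || decide (c = '@'))) ||
  ((lines.all fun l => l.length == w) &&
   (lines.zipIdx.all fun p => p.1.zipIdx.all fun q =>
      !((decide ('a' ≤ q.1) && decide (q.1 ≤ 'z')) || (decide ('A' ≤ q.1) && decide (q.1 ≤ 'Z')) ||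
        decide (q.1 = '.') || decide (q.1 = '@')) ||
      (decide (1 ≤ q.2) && decide (q.2 + 1 < w) && decide (1 ≤ p.2) && decide (p.2 + 1 < h))))

def Pre_compute_map (map2d : String) : Prop := pvPreCheck map2d = true
instance (map2d : String) : Decidable (Pre_compute_map map2d) := by
  unfold Pre_compute_map; infer_instance

def pvWitness_compute_map : String := "#####\n#a.b#\n#####"

def Spec_compute_map (map2d : String) (out : List (String × List (String × Int × List String))) : Prop := out = compute_map_alt map2d
instance (map2d : String) (out : List (String × List (String × Int × List String))) : Decidable (Spec_compute_map map2d out) := by unfold Spec_compute_map; infer_instance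

-- ===== CLAIM (what is proved, stated in full; the proofs are below) =====
def Claim_equal_compute_map : Prop := ∀ (map2d : String), Dom_compute_map map2d → Pre_compute_map map2d → Spec_compute_map map2d (compute_map map2d)

-- ===== LEMMAS AND PROOFS =====

theorem pvStartLoopB_eq (charmap : List String) (key : String) (l : List Int) :
    pvStartLoopB charmap key l =
      match l.filter (fun i => PySem.Str.isIn key (PySem.List.pyGetD charmap i "")) with
      | [] => (0, 0)
      | row :: _ => (PySem.Str.find (PySem.List.pyGetD charmap row "") key, row) := by
  induction l with
  | nil => rfl
  | cons y ys ih =>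
    by_cases h : PySem.Str.find (PySem.List.pyGetD charmap y "") key ≠ -1
    · have hin : PySem.Str.isIn key (PySem.List.pyGetD charmap y "") = true := by
        rw [PySem.Str.isIn_iff_infix]
        exact (PySem.Str.find_ne_neg_one_iff _ _).mp h
      have hfind : ¬ PySem.Chars.find (PySem.List.pyGetD charmap y "").toList key.toList = -1 := by
        simpa using h
      have hin' : PySem.Chars.isIn key.toList (PySem.List.pyGetD charmap y "").toList = true := by
        simpa using hin
      simp [pvStartLoopB, hfind, hin']
    · have hin : PySem.Str.isIn key (PySem.List.pyGetD charmap y "") = false := by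
        rw [Bool.eq_false_iff, ne_eq, PySem.Str.isIn_iff_infix]
        intro hm
        exact h ((PySem.Str.find_ne_neg_one_iff _ _).mpr hm)
      have hfind : PySem.Chars.find (PySem.List.pyGetD charmap y "").toList key.toList = -1 := by
        simpa using h
      have hin' : PySem.Chars.isIn key.toList (PySem.List.pyGetD charmap y "").toList = false := by
        simpa using hin
      simp [pvStartLoopB, hfind, hin', ih]

theorem pvPosition_eq (map2d key : String) :
    pvStartLoopB ((PySem.Str.split? map2d "\n").getD []) key
        (PySem.List.pyRange 0 (PySem.List.len ((PySem.Str.split? map2d "\n").getD [])) 1) =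
      pvPositionA map2d key := by
  rw [pvStartLoopB_eq]; rfl

-- A's loop body for one direction, at child fuel `fuel`
def pvBodyA (charmap : List String) (fuel : Nat) (x y : Int)
    (visited : PySem.Set (Int × Int)) (δ : Int × Int) : List (String × Int × List String) :=
  let cx := x + δ.1
  let cy := y + δ.2
  if (cx, cy) ∈ visited then []
  else
    match pvCell charmap cx cy with
    | none => []
    | some cell =>
      (if 'a' ≤ cell ∧ cell ≤ 'z' then [(String.ofList [cell], (1 : Int), ([] : List String))] else []) ++
      (if 'A' ≤ cell ∧ cell ≤ 'Z' then
          (pvFindKeysA charmap fuel cx cy (PySem.Set.add visited (cx, cy))).map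
            (fun r => (r.1, r.2.1 + 1, r.2.2 ++ [PySem.Str.lower (String.ofList [cell])]))
        else []) ++
      (if cell = '.' ∨ cell = '@' then
          (pvFindKeysA charmap fuel cx cy (PySem.Set.add visited (cx, cy))).map
            (fun r => (r.1, r.2.1 + 1, r.2.2))
        else [])

theorem pvFindKeysA_succ (charmap : List String) (d : Nat) (x y : Int)
    (visited : PySem.Set (Int × Int)) :
    pvFindKeysA charmap (d + 1) x y visited =
      pvDelta.flatMap (pvBodyA charmap d x y visited) := by
  show pvDelta.foldl _ [] = _
  have hfun : (fun (keys : List (String × Int × List String)) (δ : Int × Int) =>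
      let cx := x + δ.1
      let cy := y + δ.2
      if (cx, cy) ∈ visited then keys
      else
        match pvCell charmap cx cy with
        | none => keys
        | some cell =>
          let keys1 := if 'a' ≤ cell ∧ cell ≤ 'z' then
              keys ++ [(String.ofList [cell], (1 : Int), ([] : List String))] else keys
          let keys2 := if 'A' ≤ cell ∧ cell ≤ 'Z' then
              keys1 ++ (pvFindKeysA charmap d cx cy (PySem.Set.add visited (cx, cy))).map
                (fun r => (r.1, r.2.1 + 1, r.2.2 ++ [PySem.Str.lower (String.ofList [cell])]))
            else keys1
          if cell = '.' ∨ cell = '@' then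
              keys2 ++ (pvFindKeysA charmap d cx cy (PySem.Set.add visited (cx, cy))).map
                (fun r => (r.1, r.2.1 + 1, r.2.2))
            else keys2)
      = (fun keys δ => keys ++ pvBodyA charmap d x y visited δ) := by
    funext keys δ
    dsimp only [pvBodyA]
    split
    · simp
    · split
      · simp
      · split_ifs <;> simp [List.append_assoc]
  rw [hfun, PySem.List.foldl_append_eq_flatMap]
  simp

theorem pvRun_expand (charmap : List String) : ∀ (d : Nat) (x y dist : Int)
    (doors : List String) (visited : PySem.Set (Int × Int)) (rest : List PvItem),
    pvRun charmap (PvItem.expand x y dist doors visited d :: rest)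
      = (pvFindKeysA charmap d x y visited).map (fun r => (r.1, dist + r.2.1, r.2.2 ++ doors))
        ++ pvRun charmap rest := by
  intro d
  induction d with
  | zero =>
    intro x y dist doors visited rest
    simp [pvRun, pvFindKeysA]
  | succ d ih =>
    intro x y dist doors visited rest
    rw [show pvRun charmap (PvItem.expand x y dist doors visited (d + 1) :: rest)
        = pvRun charmap (pvDelta.filterMap (pvNbrItem charmap x y dist doors visited d) ++ rest)
      from by rw [pvRun]]
    rw [pvFindKeysA_succ]
    suffices h : ∀ (δs : List (Int × Int)) (rest : List PvItem),
        pvRun charmap (δs.filterMap (pvNbrItem charmap x y dist doors visited d) ++ rest)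
          = ((δs.flatMap (pvBodyA charmap d x y visited)).map
              (fun r => (r.1, dist + r.2.1, r.2.2 ++ doors))) ++ pvRun charmap rest by
      exact h pvDelta rest
    intro δs
    induction δs with
    | nil => intro rest; simp
    | cons δ δs ihs =>
      intro rest
      by_cases hmem : (x + δ.1, y + δ.2) ∈ visited
      · have hn : pvNbrItem charmap x y dist doors visited d δ = none := by
          simp [pvNbrItem, hmem]
        have hb : pvBodyA charmap d x y visited δ = [] := by
          simp [pvBodyA, hmem]
        simp [hn, hb, ihs]
      · cases hcell : pvCell charmap (x + δ.1) (y + δ.2) with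
        | none =>
          have hn : pvNbrItem charmap x y dist doors visited d δ = none := by
            simp [pvNbrItem, hmem, hcell]
          have hb : pvBodyA charmap d x y visited δ = [] := by
            simp [pvBodyA, hmem, hcell]
          simp [hn, hb, ihs]
        | some cell =>
          by_cases h1 : 'a' ≤ cell ∧ cell ≤ 'z'
          · have h2 : ¬('A' ≤ cell ∧ cell ≤ 'Z') := fun hc => absurd (le_trans h1.1 hc.2) (by decide)
            have h3 : ¬(cell = '.' ∨ cell = '@') := by
              rintro (rfl | rfl) <;> exact absurd h1.1 (by decide)
            have hn : pvNbrItem charmap x y dist doors visited d δ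
                = some (.emit (String.ofList [cell], dist + 1, doors)) := by
              simp [pvNbrItem, hmem, hcell, h1]
            have hb : pvBodyA charmap d x y visited δ
                = [(String.ofList [cell], (1 : Int), ([] : List String))] := by
              simp [pvBodyA, hmem, hcell, h1, h2, h3]
            simp only [List.filterMap_cons, hn, List.flatMap_cons, hb, List.cons_append]
            rw [show pvRun charmap (PvItem.emit (String.ofList [cell], dist + 1, doors)
                  :: (δs.filterMap (pvNbrItem charmap x y dist doors visited d) ++ rest))
                = (String.ofList [cell], dist + 1, doors)
                  :: pvRun charmap (δs.filterMap (pvNbrItem charmap x y dist doors visited d) ++ rest)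
              from by rw [pvRun]]
            simp [ihs]
          · by_cases h2 : 'A' ≤ cell ∧ cell ≤ 'Z'
            · have h3 : ¬(cell = '.' ∨ cell = '@') := by
                rintro (rfl | rfl) <;> exact absurd h2.1 (by decide)
              have hn : pvNbrItem charmap x y dist doors visited d δ
                  = some (.expand (x + δ.1) (y + δ.2) (dist + 1)
                      (PySem.Str.lower (String.ofList [cell]) :: doors)
                      (PySem.Set.add visited (x + δ.1, y + δ.2)) d) := by
                simp [pvNbrItem, hmem, hcell, h1, h2]
              have hb : pvBodyA charmap d x y visited δ
                  = (pvFindKeysA charmap d (x + δ.1) (y + δ.2)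
                      (PySem.Set.add visited (x + δ.1, y + δ.2))).map
                      (fun r => (r.1, r.2.1 + 1, r.2.2 ++ [PySem.Str.lower (String.ofList [cell])])) := by
                simp [pvBodyA, hmem, hcell, h1, h2, h3]
              simp only [List.filterMap_cons, hn, List.flatMap_cons, hb, List.cons_append]
              rw [ih, ihs]
              simp only [List.map_append, List.map_map, List.append_assoc]
              congr 1
              apply List.map_congr_left
              intro r _
              simp only [Function.comp_apply, Prod.mk.injEq, List.append_assoc,
                List.singleton_append, true_and]
              exact ⟨by omega, trivial⟩
            · by_cases h3 : cell = '.' ∨ cell = '@'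
              · have hn : pvNbrItem charmap x y dist doors visited d δ
                    = some (.expand (x + δ.1) (y + δ.2) (dist + 1) doors
                        (PySem.Set.add visited (x + δ.1, y + δ.2)) d) := by
                  simp [pvNbrItem, hmem, hcell, h1, h2, h3]
                have hb : pvBodyA charmap d x y visited δ
                    = (pvFindKeysA charmap d (x + δ.1) (y + δ.2)
                        (PySem.Set.add visited (x + δ.1, y + δ.2))).map
                        (fun r => (r.1, r.2.1 + 1, r.2.2)) := by
                  simp [pvBodyA, hmem, hcell, h1, h2, h3]
                simp only [List.filterMap_cons, hn, List.flatMap_cons, hb, List.cons_append]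
                rw [ih, ihs]
                simp only [List.map_append, List.map_map, List.append_assoc]
                congr 1
                apply List.map_congr_left
                intro r _
                simp only [Function.comp_apply, Prod.mk.injEq, true_and]
                exact ⟨by omega, trivial⟩
              · have hn : pvNbrItem charmap x y dist doors visited d δ = none := by
                  simp [pvNbrItem, hmem, hcell, h1, h2, h3]
                have hb : pvBodyA charmap d x y visited δ = [] := by
                  simp [pvBodyA, hmem, hcell, h1, h2, h3]
                simp [hn, hb, ihs]

theorem pvVisit_eq (map2d key : String) :
    pvVisitB ((PySem.Str.split? map2d "\n").getD []) (map2d.toList.length + 1) key =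
      pvKeysICanVisitA map2d key := by
  unfold pvVisitB pvKeysICanVisitA
  rw [pvPosition_eq]
  rw [pvRun_expand]
  simp only [pvRun, List.append_nil]
  rw [List.map_congr_left (g := id) (by intro r _; simp)]
  simp

theorem pv_insert_of_contains (d : PySem.Dict String (List (String × Int × List String)))
    (k : String) (f : String → List (String × Int × List String))
    (hc : d.contains k = true) (hv : ∀ p ∈ d.items, p.2 = f p.1) :
    d.insert k (f k) = d := by
  apply PySem.Dict.ext
  rw [PySem.Dict.items_insert_of_contains d _ hc]
  conv_rhs => rw [← List.map_id d.items]
  apply List.map_congr_left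
  intro p hp
  by_cases hbk : p.1 == k
  · have hk : p.1 = k := by simpa using hbk
    have hval : p.2 = f p.1 := hv p hp
    simp [← hk, ← hval]
  · simp [hbk]

theorem pv_dict_fold (map2d : String) : ∀ (ks : List Char)
    (d : PySem.Dict String (List (String × Int × List String))),
    (∀ p ∈ d.items, p.2 = pvKeysICanVisitA map2d p.1) →
    (ks.filter (fun k => decide (('a' ≤ k ∧ k ≤ 'z') ∨ k = '@'))).foldl
        (fun d k => d.insert (String.ofList [k]) (pvKeysICanVisitA map2d (String.ofList [k]))) d
      = ks.foldl (fun out k =>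
          if (('a' ≤ k ∧ k ≤ 'z') ∨ k = '@') ∧ ¬(out.contains (String.ofList [k]) = true) then
            out.insert (String.ofList [k]) (pvKeysICanVisitA map2d (String.ofList [k]))
          else out) d := by
  intro ks
  induction ks with
  | nil => intro d _; rfl
  | cons k ks ih =>
    intro d hInv
    by_cases hk : ('a' ≤ k ∧ k ≤ 'z') ∨ k = '@'
    · rw [List.filter_cons_of_pos (by simpa using hk)]
      by_cases hc : d.contains (String.ofList [k]) = true
      · rw [List.foldl_cons,
          pv_insert_of_contains d (String.ofList [k]) (pvKeysICanVisitA map2d) hc hInv,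
          ih d hInv, List.foldl_cons, if_neg (by simp [hc])]
      · rw [List.foldl_cons, List.foldl_cons, if_pos ⟨hk, hc⟩]
        apply ih
        intro p hp
        rcases (PySem.Dict.mem_items_insert _ _ _ _).mp hp with h | h
        · rw [h]
        · exact hInv p h.1
    · rw [List.filter_cons_of_neg (by simpa using hk), ih d hInv, List.foldl_cons,
        if_neg (by intro h; exact hk h.1)]

-- ===== VERDICT (by name: the statement is the Claim_ definition above) =====
theorem compute_map_spec : Claim_equal_compute_map := by
  intro map2d _ _
  unfold Spec_compute_map compute_map compute_map_alt
  simp only [pvVisit_eq]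
  rw [pv_dict_fold map2d map2d.toList PySem.Dict.empty
    (by intro p hp; simp [PySem.Dict.empty] at hp)]
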